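-- pv_equiv track=rewrite | github.com/ALS15204/advent_of_code | aoc_2023/day_3/gear.py | get_position_to_number
-- ===== SOURCE A (Python) =====
-- from typing import Dict, List, Tuple, Set
--
-- def get_full_positions_of_string(start_position: Tuple, text: str) -> Tuple[Tuple]:
--     """Return a list of all positions of a string in a diagram."""
--     line_idx, char_idx = start_position
--     return tuple((line_idx, char_idx + i) for i in range(len(text)))
--
-- def get_position_to_number(one_diagram_line: str, line_number: int) -> Dict[Tuple[Tuple], int]:
--     """Return a dictionary that maps the full position of a number in a diagram line to the number itself."""
--     position_to_number = {}
--     number_string = ""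
--     for i, char in enumerate(one_diagram_line):
--         if char.isdigit():
--             number_string += char
--         else:
--             if number_string:
--                 position_to_number[
--                     get_full_positions_of_string((line_number, i - len(number_string)), number_string)
--                     ] = int(number_string)
--                 number_string = ""
--     if number_string:
--         position_to_number[
--             get_full_positions_of_string(
--                 (line_number, len(one_diagram_line) - len(number_string)), number_string
--                 )
--             ] = int(number_string)
--     return position_to_number
-- ===== SOURCE B (Python) =====
-- def get_position_to_number(one_diagram_line: str, line_number: int):
--     """Map each maximal digit run's full position tuple to its value, by jumping run to run."""
--     result = {}
--     n = len(one_diagram_line)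
--     i = 0
--     while i < n:
--         if one_diagram_line[i].isdigit():
--             j = i
--             while j < n and one_diagram_line[j].isdigit():
--                 j += 1
--             result[tuple((line_number, c) for c in range(i, j))] = int(one_diagram_line[i:j])
--             i = j
--         else:
--             i += 1
--     return result
-- ===== Notes on version B (the rewrite author's own statement) =====
-- stated objective: alternative
-- what changed: Replaces the per-character accumulator loop (append-to-string, isdigit branch, post-loop flush) with an index-jumping scan that locates each maximal digit run directly, slices it out, and emits its key/value in one step, eliminating the number_string accumulator and the flush entirely.
import Mathlib
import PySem

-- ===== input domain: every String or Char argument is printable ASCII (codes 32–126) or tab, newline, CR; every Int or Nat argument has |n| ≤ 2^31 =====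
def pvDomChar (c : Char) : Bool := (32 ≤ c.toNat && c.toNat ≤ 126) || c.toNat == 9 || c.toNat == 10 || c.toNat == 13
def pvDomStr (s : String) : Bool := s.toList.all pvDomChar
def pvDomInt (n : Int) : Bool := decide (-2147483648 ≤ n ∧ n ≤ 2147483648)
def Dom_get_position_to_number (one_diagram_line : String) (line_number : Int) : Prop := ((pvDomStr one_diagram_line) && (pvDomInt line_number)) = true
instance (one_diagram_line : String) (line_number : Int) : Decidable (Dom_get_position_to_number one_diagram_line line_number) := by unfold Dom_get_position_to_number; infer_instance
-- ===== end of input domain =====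

-- B replaces A's per-character accumulator loop (append char, isdigit branch, post-loop flush)
-- with an index-jumping scan that locates each maximal digit run and emits its key/value at once.

-- ===== PORT A =====

-- get_full_positions_of_string((line_idx, char_idx), text)
def pvFullPositions (start_position : Int × Int) (text : List Char) : List (Int × Int) :=
  (List.range text.length).map (fun (i : Nat) => (start_position.1, start_position.2 + (i : Int)))

-- one iteration of A's for-loop body; state = (position_to_number, number_string)
def pvStepA (line_number : Int)
    (st : PySem.Dict (List (Int × Int)) Int × List Char) (p : Int × Char) :
    PySem.Dict (List (Int × Int)) Int × List Char :=
  if PySem.Chars.isdigit p.2 then (st.1, st.2 ++ [p.2])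
  else if st.2.isEmpty then st
  else
    -- int(number_string): exact, number_string is a nonempty run of digits so int() cannot raise
    (st.1.insert (pvFullPositions (line_number, p.1 - (st.2.length : Int)) st.2)
        ((PySem.Int.ofChars? st.2).getD 0), [])

-- the post-loop flush (n = len(one_diagram_line))
def pvFlushA (line_number : Int) (n : Int)
    (st : PySem.Dict (List (Int × Int)) Int × List Char) : PySem.Dict (List (Int × Int)) Int :=
  if st.2.isEmpty then st.1
  else st.1.insert (pvFullPositions (line_number, n - (st.2.length : Int)) st.2)
        ((PySem.Int.ofChars? st.2).getD 0)

def get_position_to_number (one_diagram_line : String) (line_number : Int) :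
    List (List (Int × Int) × Int) :=
  (pvFlushA line_number (PySem.Str.len one_diagram_line)
    ((PySem.List.enumerate one_diagram_line.toList 0).foldl (pvStepA line_number)
      (PySem.Dict.empty, []))).items

-- ===== PORT B =====

-- B's outer while loop: structural recursion on the remaining characters, i = current index;
-- the inner `while j < n and isdigit` loop is the maximal digit prefix (takeWhile), line[i:j] the run.
def pvBLoop (line_number : Int) (cs : List Char) (i : Int)
    (d : PySem.Dict (List (Int × Int)) Int) : PySem.Dict (List (Int × Int)) Int :=
  match cs with
  | [] => d
  | c :: rest =>
    if PySem.Chars.isdigit c then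
      let run := (c :: rest).takeWhile PySem.Chars.isdigit
      let rest' := (c :: rest).dropWhile PySem.Chars.isdigit
      pvBLoop line_number rest' (i + (run.length : Int))
        (d.insert ((PySem.List.pyRange i (i + (run.length : Int)) 1).map (fun col => (line_number, col)))
          ((PySem.Int.ofChars? run).getD 0))     -- int(line[i:j]): run is nonempty digits, cannot raise
    else pvBLoop line_number rest (i + 1) d
termination_by cs.length
decreasing_by
  · simp only [List.dropWhile]
    have := List.length_dropWhile_le (p := PySem.Chars.isdigit) rest
    simpa [*] using Nat.lt_succ_of_le this
  · simp

def get_position_to_number_alt (one_diagram_line : String) (line_number : Int) :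
    List (List (Int × Int) × Int) :=
  (pvBLoop line_number one_diagram_line.toList 0 PySem.Dict.empty).items

-- ===== PRECONDITION & SPEC =====
def Spec_get_position_to_number (one_diagram_line : String) (line_number : Int) (out : List (List (Int × Int) × Int)) : Prop := out = get_position_to_number_alt one_diagram_line line_number
instance (one_diagram_line : String) (line_number : Int) (out : List (List (Int × Int) × Int)) : Decidable (Spec_get_position_to_number one_diagram_line line_number out) := by unfold Spec_get_position_to_number; infer_instance

-- ===== CLAIM (what is proved, stated in full; the proofs are below) =====
def Claim_equal_get_position_to_number : Prop := ∀ (one_diagram_line : String) (line_number : Int), Dom_get_position_to_number one_diagram_line line_number → Spec_get_position_to_number one_diagram_line line_number (get_position_to_number one_diagram_line line_number)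

-- ===== LEMMAS AND PROOFS =====

-- A's position key built from List.range equals B's key built from pyRange
lemma pvRange_key (a : Int) (n : Nat) :
    PySem.List.pyRange a (a + (n : Int)) 1 = (List.range n).map (fun (i : Nat) => a + (i : Int)) := by
  induction n generalizing a with
  | zero => simp [PySem.List.pyRange]
  | succ m ih =>
    rw [PySem.List.pyRange_one_cons (by omega)]
    rw [show a + ((m + 1 : Nat) : Int) = (a + 1) + (m : Int) by push_cast; ring]
    rw [ih (a + 1), List.range_succ_eq_map]
    simp only [List.map_cons, Nat.cast_zero, add_zero, List.map_map]
    congr 1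
    apply List.map_congr_left
    intro x _
    simp only [Function.comp_apply]
    push_cast; ring

lemma pvKey_eq (ln a : Int) (cs : List Char) :
    (PySem.List.pyRange a (a + (cs.length : Int)) 1).map (fun col => (ln, col))
      = pvFullPositions (ln, a) cs := by
  rw [pvRange_key]
  simp [pvFullPositions, List.map_map, Function.comp]


-- one non-digit step of A's loop with an empty accumulator does nothing to the dict
lemma pvStepA_nondigit_empty (ln i : Int) (c : Char) (d : PySem.Dict (List (Int × Int)) Int)
    (hc : ¬ PySem.Chars.isdigit c) : pvStepA ln (d, []) (i, c) = (d, []) := by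
  simp [pvStepA, hc]

-- core invariant: with a nonempty accumulator ns read from positions i-|ns| … i-1, the rest of
-- A's loop (plus flush) behaves as if the maximal digit run were flushed at once
lemma pvL2 (ln : Int) (cs : List Char) :
    ∀ (i : Int) (d : PySem.Dict (List (Int × Int)) Int) (ns : List Char), ns ≠ [] →
    pvFlushA ln (i + (cs.length : Int)) ((PySem.List.enumerate cs i).foldl (pvStepA ln) (d, ns))
      = pvFlushA ln (i + (cs.length : Int))
          ((PySem.List.enumerate (cs.dropWhile PySem.Chars.isdigit)
              (i + ((cs.takeWhile PySem.Chars.isdigit).length : Int))).foldl (pvStepA ln)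
            (d.insert
              (pvFullPositions (ln, i - (ns.length : Int)) (ns ++ cs.takeWhile PySem.Chars.isdigit))
              ((PySem.Int.ofChars? (ns ++ cs.takeWhile PySem.Chars.isdigit)).getD 0), [])) := by
  induction cs with
  | nil =>
    intro i d ns hns
    simp [PySem.List.enumerate, pvFlushA, List.isEmpty_iff, hns]
  | cons c rest ih =>
    intro i d ns hns
    by_cases hc : PySem.Chars.isdigit c
    · rw [PySem.List.enumerate_cons]
      simp only [List.foldl_cons]
      rw [show pvStepA ln (d, ns) (i, c) = (d, ns ++ [c]) by simp [pvStepA, hc]]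
      rw [show i + (((c :: rest).length : Nat) : Int) = (i + 1) + ((rest.length : Nat) : Int) by
        push_cast; simp; ring]
      rw [ih (i + 1) d (ns ++ [c]) (by simp)]
      simp only [List.takeWhile_cons_of_pos hc, List.dropWhile_cons_of_pos hc]
      rw [show i + 1 - (((ns ++ [c]).length : Nat) : Int) = i - (ns.length : Int) by
        simp only [List.length_append, List.length_cons, List.length_nil]; push_cast; ring]
      rw [show ns ++ [c] ++ rest.takeWhile PySem.Chars.isdigit
          = ns ++ c :: rest.takeWhile PySem.Chars.isdigit by simp]
      rw [show i + (((c :: rest.takeWhile PySem.Chars.isdigit).length : Nat) : Int)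
          = i + 1 + (((rest.takeWhile PySem.Chars.isdigit).length : Nat) : Int) by
        simp only [List.length_cons]; push_cast; ring]
    · rw [PySem.List.enumerate_cons]
      simp only [List.foldl_cons]
      rw [show pvStepA ln (d, ns) (i, c)
            = (d.insert (pvFullPositions (ln, i - (ns.length : Int)) ns)
                ((PySem.Int.ofChars? ns).getD 0), []) by
        simp [pvStepA, hc, List.isEmpty_iff, hns]]
      simp only [List.takeWhile_cons_of_neg hc, List.dropWhile_cons_of_neg hc,
        List.append_nil, List.length_nil, Nat.cast_zero, add_zero]
      rw [PySem.List.enumerate_cons]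
      simp only [List.foldl_cons]
      rw [pvStepA_nondigit_empty ln i c _ hc]

-- with empty accumulator, A's remaining loop (plus flush) is exactly B's run-jumping loop
lemma pvL1N (ln : Int) (N : Nat) :
    ∀ (cs : List Char), cs.length ≤ N → ∀ (i : Int) (d : PySem.Dict (List (Int × Int)) Int),
    pvFlushA ln (i + (cs.length : Int)) ((PySem.List.enumerate cs i).foldl (pvStepA ln) (d, []))
      = pvBLoop ln cs i d := by
  induction N with
  | zero =>
    intro cs hcs i d
    have : cs = [] := List.length_eq_zero_iff.mp (Nat.le_zero.mp hcs)
    subst this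
    simp [PySem.List.enumerate, pvFlushA, pvBLoop]
  | succ N ih =>
    intro cs hcs i d
    match cs with
    | [] => simp [PySem.List.enumerate, pvFlushA, pvBLoop]
    | c :: rest =>
      by_cases hc : PySem.Chars.isdigit c
      · rw [PySem.List.enumerate_cons]
        simp only [List.foldl_cons]
        rw [show pvStepA ln (d, []) (i, c) = (d, [c]) by simp [pvStepA, hc]]
        rw [show i + (((c :: rest).length : Nat) : Int) = (i + 1) + ((rest.length : Nat) : Int) by
          push_cast; simp; ring]
        rw [pvL2 ln rest (i + 1) d [c] (by simp)]
        -- realign lengths and indices with B's run-at-once step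
        have hlen : ((rest.takeWhile PySem.Chars.isdigit).length : Int)
            + ((rest.dropWhile PySem.Chars.isdigit).length : Int) = (rest.length : Int) := by
          have h := congrArg List.length (List.takeWhile_append_dropWhile
            (p := PySem.Chars.isdigit) (l := rest))
          simp only [List.length_append] at h
          exact_mod_cast h
        rw [show i + 1 + ((rest.length : Nat) : Int)
            = (i + ((((c :: rest).takeWhile PySem.Chars.isdigit).length : Nat) : Int))
              + ((((c :: rest).dropWhile PySem.Chars.isdigit).length : Nat) : Int) by
          simp only [List.takeWhile_cons_of_pos hc, List.dropWhile_cons_of_pos hc,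
            List.length_cons]
          push_cast
          omega]
        rw [show i + 1 - (([c].length : Nat) : Int) = i by simp]
        rw [show ([c] ++ rest.takeWhile PySem.Chars.isdigit : List Char)
            = (c :: rest).takeWhile PySem.Chars.isdigit by
          simp [List.takeWhile_cons_of_pos hc]]
        rw [show i + 1 + (((rest.takeWhile PySem.Chars.isdigit).length : Nat) : Int)
            = i + ((((c :: rest).takeWhile PySem.Chars.isdigit).length : Nat) : Int) by
          simp only [List.takeWhile_cons_of_pos hc, List.length_cons]
          push_cast; ring]
        rw [← List.dropWhile_cons_of_pos (l := rest) hc]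
        rw [ih ((c :: rest).dropWhile PySem.Chars.isdigit)
          (by
            simp only [List.dropWhile_cons_of_pos hc]
            have := List.length_dropWhile_le (p := PySem.Chars.isdigit) rest
            simp only [List.length_cons] at hcs
            omega)]
        conv_rhs => rw [pvBLoop]
        simp only [hc, if_pos]
        rw [pvKey_eq ln i ((c :: rest).takeWhile PySem.Chars.isdigit)]
      · rw [PySem.List.enumerate_cons]
        simp only [List.foldl_cons]
        rw [pvStepA_nondigit_empty ln i c d hc]
        rw [show i + (((c :: rest).length : Nat) : Int) = (i + 1) + ((rest.length : Nat) : Int) by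
          push_cast; simp; ring]
        rw [ih rest (by simp only [List.length_cons] at hcs; omega)]
        conv_rhs => rw [pvBLoop]
        simp [hc]

-- ===== VERDICT (by name: the statement is the Claim_ definition above) =====
theorem get_position_to_number_spec : Claim_equal_get_position_to_number := by
  intro line ln _
  unfold Spec_get_position_to_number get_position_to_number get_position_to_number_alt
  rw [show PySem.Str.len line = 0 + ((line.toList.length : Nat) : Int) by
    simp [PySem.Str.len_eq]]
  rw [pvL1N ln line.toList.length line.toList (le_refl _)]
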